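-- pv_equiv track=rewrite | github.com/JulianHerreilers/advent_of_code | AOC_2023/day3.py | concat_num
-- ===== SOURCE A (Python) =====
-- def concat_num(string,x, row):
--
--     num = ""
--     i = x
--     if i == -1: i = 0
--     j = x
--     while i-1>=0:
--        if  string[i-1].isdigit(): i-=1
--        else: break
--     while j+1<len(string):
--         if string[j+1].isdigit(): j+=1
--         else: break
--     num=int(string[i:j+1], 10)
--
--     return [num, i, j, row]
-- ===== SOURCE B (Python) =====
-- def concat_num(string, x, row):
--     if x == -1:
--         x = 0
--     left = string[:x]
--     right = string[x + 1:]
--     i = x - (len(left) - len(left.rstrip('0123456789')))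
--     j = x + (len(right) - len(right.lstrip('0123456789')))
--     return [int(string[i:j + 1], 10), i, j, row]
-- ===== Notes on version B (the rewrite author's own statement) =====
-- stated objective: simpler
-- what changed: Replaced the two char-by-char expand-while loops with a loop-free slice decomposition: i and j come from the trailing/leading digit-run lengths of string[:x] and string[x+1:], measured via rstrip/lstrip length differences.
-- outside the precondition, e.g. on concat_num('28', -3, 0): A returns [28, -3, 1, 0], B raises ValueError
import Mathlib
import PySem

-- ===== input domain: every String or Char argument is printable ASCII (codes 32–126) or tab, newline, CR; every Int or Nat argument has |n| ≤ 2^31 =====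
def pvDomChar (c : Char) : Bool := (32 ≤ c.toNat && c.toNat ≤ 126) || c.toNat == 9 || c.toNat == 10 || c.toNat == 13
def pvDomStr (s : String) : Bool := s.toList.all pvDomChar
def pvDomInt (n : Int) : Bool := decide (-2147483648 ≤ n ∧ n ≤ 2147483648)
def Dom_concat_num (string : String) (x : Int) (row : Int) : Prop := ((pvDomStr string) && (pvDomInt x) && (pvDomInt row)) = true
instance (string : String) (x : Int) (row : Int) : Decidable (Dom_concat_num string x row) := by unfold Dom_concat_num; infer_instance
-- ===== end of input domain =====

-- B replaces A's two char-by-char expand-while loops by a slice-based decomposition: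
-- trailing/leading digit-run lengths of string[:x] and string[x+1:] via rstrip/lstrip,
-- same return value (equivalence is about the return value; neither mutates arguments).


-- ===== PORT A =====
-- `while i-1>=0: if string[i-1].isdigit(): i-=1 else: break` — fuel = i.toNat bounds the
-- iteration count (i decreases by 1 while i-1 ≥ 0); pyGet? none = IndexError (excluded by Pre_).
def aLeft (cs : List Char) (i : Int) (fuel : Nat) : Int :=
  match fuel with
  | 0 => i
  | fuel + 1 =>
    if i - 1 ≥ 0 then
      match PySem.List.pyGet? cs (i - 1) with
      | some c => if PySem.Chars.isdigit c then aLeft cs (i - 1) fuel else i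
      | none => i
    else i

-- `while j+1<len(string): if string[j+1].isdigit(): j+=1 else: break` — fuel bounds iterations.
def aRight (cs : List Char) (j : Int) (fuel : Nat) : Int :=
  match fuel with
  | 0 => j
  | fuel + 1 =>
    if j + 1 < (cs.length : Int) then
      match PySem.List.pyGet? cs (j + 1) with
      | some c => if PySem.Chars.isdigit c then aRight cs (j + 1) fuel else j
      | none => j
    else j

def concat_num (string : String) (x : Int) (row : Int) : List Int :=
  let cs := string.toList
  let i0 : Int := if x = -1 then 0 else x
  let i := aLeft cs i0 i0.toNat
  let j := aRight cs x ((cs.length : Int) - x).toNat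
  -- int(string[i:j+1], 10); none = ValueError (excluded by Pre_)
  match PySem.Int.ofCharsBase? (PySem.List.slice cs (some i) (some (j + 1))) 10 with
  | some num => [num, i, j, row]
  | none => []

-- ===== PORT B =====
-- hand ports of str.rstrip('0123456789') / str.lstrip('0123456789') — exact: they strip
-- characters of the given set from the right/left end only.
def rstripDigits (cs : List Char) : List Char :=
  (cs.reverse.dropWhile (fun c => "0123456789".toList.contains c)).reverse

def lstripDigits (cs : List Char) : List Char :=
  cs.dropWhile (fun c => "0123456789".toList.contains c)

def concat_num_alt (string : String) (x : Int) (row : Int) : List Int :=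
  let cs := string.toList
  let x' : Int := if x = -1 then 0 else x
  let left := PySem.List.slice cs none (some x')
  let right := PySem.List.slice cs (some (x' + 1)) none
  let i : Int := x' - ((left.length : Int) - ((rstripDigits left).length : Int))
  let j : Int := x' + ((right.length : Int) - ((lstripDigits right).length : Int))
  match PySem.Int.ofCharsBase? (PySem.List.slice cs (some i) (some (j + 1))) 10 with
  | some num => [num, i, j, row]
  | none => []

-- ===== PRECONDITION & SPEC =====
-- Pre_ keeps the inputs on which A returns a number read around index x: -1 ≤ x ≤ len(string)
-- with a digit at the clamped index x' (for x = len, a digit at the end), or x' on a single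
-- whitespace/sign character directly followed by a digit and not preceded by one; everything
-- else either makes A raise IndexError/ValueError, or (for x < -1) A's return relies on
-- Python's negative-index wraparound, a quirk B does not reproduce.
def Pre_concat_num (string : String) (x : Int) (row : Int) : Prop :=
  -1 ≤ x ∧ x ≤ (string.toList.length : Int) ∧
    ((x = (string.toList.length : Int) ∧ 0 < string.toList.length ∧
        PySem.Chars.isdigit (string.toList.getD (string.toList.length - 1) ' ') = true)
      ∨ (x < (string.toList.length : Int) ∧
        PySem.Chars.isdigit (string.toList.getD (if x = -1 then 0 else x).toNat ' ') = true)
      ∨ (0 ≤ x ∧ x + 1 < (string.toList.length : Int) ∧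
        (string.toList.getD x.toNat ' ') ∈ [' ', '\t', '\n', '\r', '+', '-'] ∧
        (x = 0 ∨ PySem.Chars.isdigit (string.toList.getD (x.toNat - 1) ' ') = false) ∧
        PySem.Chars.isdigit (string.toList.getD (x.toNat + 1) ' ') = true))
instance (string : String) (x : Int) (row : Int) : Decidable (Pre_concat_num string x row) := by
  unfold Pre_concat_num; infer_instance

def pvWitness_concat_num : String × Int × Int := ("ab12c", 3, 7)

def Spec_concat_num (string : String) (x : Int) (row : Int) (out : List Int) : Prop := out = concat_num_alt string x row
instance (string : String) (x : Int) (row : Int) (out : List Int) : Decidable (Spec_concat_num string x row out) := by unfold Spec_concat_num; infer_instance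

-- ===== CLAIM (what is proved, stated in full; the proofs are below) =====
def Claim_equal_concat_num : Prop := ∀ (string : String) (x : Int) (row : Int), Dom_concat_num string x row → Pre_concat_num string x row → Spec_concat_num string x row (concat_num string x row)

-- ===== LEMMAS AND PROOFS =====
theorem digits_toList : "0123456789".toList = ['0','1','2','3','4','5','6','7','8','9'] := by decide

theorem isdigit_eq_mem (c : Char) :
    PySem.Chars.isdigit c = ("0123456789".toList.contains c) := by
  rw [digits_toList]
  rcases c with ⟨⟨⟨v, hv⟩⟩, h⟩
  simp [PySem.Chars.isdigit, List.contains_eq_mem, Char.le_def, UInt32.le_iff_toNat_le,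
        Char.ext_iff, UInt32.ext_iff]
  rw [Bool.eq_iff_iff]
  simp only [Bool.and_eq_true, Bool.or_eq_true, decide_eq_true_eq]
  omega

theorem aLeft_eq (cs : List Char) :
    ∀ n : Nat, n ≤ cs.length →
      aLeft cs (n : Int) n
        = (n : Int) - (((cs.take n).reverse.takeWhile PySem.Chars.isdigit).length : Int) := by
  intro n
  induction n with
  | zero => intro _; simp [aLeft]
  | succ n ih =>
    intro h
    have hn : n < cs.length := by omega
    have hget : PySem.List.pyGet? cs ((n + 1 : Nat) - 1 : Int) = some cs[n] := by
      have : ((n + 1 : Nat) : Int) - 1 = (n : Int) := by push_cast; ring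
      rw [this, PySem.List.pyGet?_natCast]
      simp [hn]
    have htake : cs.take (n + 1) = cs.take n ++ [cs[n]] := by
      rw [List.take_add_one]
      simp [List.getElem?_eq_getElem hn]
    rw [aLeft]
    simp only [hget]
    rw [if_pos (by push_cast; omega)]
    by_cases hd : PySem.Chars.isdigit cs[n]
    · rw [if_pos hd]
      have : ((n + 1 : Nat) : Int) - 1 = (n : Int) := by push_cast; ring
      rw [this, ih (by omega), htake, List.reverse_append]
      simp only [List.reverse_cons, List.reverse_nil, List.nil_append, List.singleton_append,
                 List.takeWhile_cons, hd, if_true, List.length_cons]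
      push_cast; omega
    · rw [if_neg hd, htake, List.reverse_append]
      simp only [List.reverse_cons, List.reverse_nil, List.nil_append, List.singleton_append]
      rw [List.takeWhile_cons, if_neg hd]
      simp only [List.length_nil]
      push_cast; omega

theorem aRight_eq (cs : List Char) :
    ∀ fuel n : Nat, n ≤ cs.length → cs.length ≤ fuel + n + 1 →
      aRight cs (n : Int) fuel
        = (n : Int) + (((cs.drop (n + 1)).takeWhile PySem.Chars.isdigit).length : Int) := by
  intro fuel
  induction fuel with
  | zero =>
    intro n h1 h2
    have : cs.drop (n + 1) = [] := List.drop_eq_nil_of_le (by omega)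
    simp [aRight, this]
  | succ fuel ih =>
    intro n h1 h2
    rw [aRight]
    by_cases hlt : (n : Int) + 1 < (cs.length : Int)
    · rw [if_pos hlt]
      have hn1 : n + 1 < cs.length := by omega
      have hget : PySem.List.pyGet? cs ((n : Int) + 1) = some cs[n+1] := by
        have : (n : Int) + 1 = ((n + 1 : Nat) : Int) := by push_cast; ring
        rw [this, PySem.List.pyGet?_natCast]
        simp [hn1]
      have hdrop : cs.drop (n + 1) = cs[n+1] :: cs.drop (n + 1 + 1) := by
        rw [List.drop_eq_getElem_cons hn1]
      rw [hget]
      by_cases hd : PySem.Chars.isdigit cs[n+1]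
      · simp only [hd, if_pos]
        have : (n : Int) + 1 = ((n + 1 : Nat) : Int) := by push_cast; ring
        rw [this, ih (n + 1) (by omega) (by omega), hdrop]
        simp only [List.takeWhile_cons, hd, if_true, List.length_cons]
        push_cast; omega
      · simp only [hd, if_neg, Bool.false_eq_true, not_false_iff]
        rw [hdrop]
        rw [List.takeWhile_cons, if_neg hd]
        simp only [List.length_nil]
        push_cast; omega
    · rw [if_neg hlt]
      have : cs.drop (n + 1) = [] := List.drop_eq_nil_of_le (by omega)
      simp [this]

theorem rstrip_count (l : List Char) :
    (l.length : Int) - ((rstripDigits l).length : Int)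
      = ((l.reverse.takeWhile PySem.Chars.isdigit).length : Int) := by
  have hP : (fun c => ("0123456789".toList.contains c)) = PySem.Chars.isdigit :=
    funext fun c => (isdigit_eq_mem c).symm
  unfold rstripDigits
  rw [hP]
  have h := congrArg List.length
    (List.takeWhile_append_dropWhile (p := PySem.Chars.isdigit) (l := l.reverse))
  simp only [List.length_append, List.length_reverse] at h
  simp only [List.length_reverse]
  omega

theorem lstrip_count (l : List Char) :
    (l.length : Int) - ((lstripDigits l).length : Int)
      = ((l.takeWhile PySem.Chars.isdigit).length : Int) := by
  have hP : (fun c => ("0123456789".toList.contains c)) = PySem.Chars.isdigit :=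
    funext fun c => (isdigit_eq_mem c).symm
  unfold lstripDigits
  rw [hP]
  have h := congrArg List.length
    (List.takeWhile_append_dropWhile (p := PySem.Chars.isdigit) (l := l))
  simp only [List.length_append] at h
  omega

-- ===== VERDICT (by name: the statement is the Claim_ definition above) =====
theorem concat_num_spec : Claim_equal_concat_num := by
  intro string x row _ hpre
  obtain ⟨h1, h2, h3⟩ := hpre
  unfold Spec_concat_num concat_num concat_num_alt
  simp only
  set cs := string.toList with hcs
  by_cases hx : x = -1
  · -- x = -1: clamped to 0; A's first right-loop step consumes the digit at index 0
    subst hx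
    have hd : PySem.Chars.isdigit (cs.getD 0 ' ') = true := by
      rcases h3 with ⟨hxl, _, _⟩ | ⟨_, hd⟩ | ⟨hx0, _⟩
      · omega
      · simpa using hd
      · omega
    norm_num at ⊢
    have hlen : 0 < cs.length := by
      by_contra hl
      have hnil : cs = [] := List.eq_nil_of_length_eq_zero (by omega)
      rw [hnil] at hd
      simp at hd
      exact absurd hd (by decide)
    have hd0 : PySem.Chars.isdigit cs[0] = true := by
      rwa [List.getD, List.getElem?_eq_getElem hlen, Option.getD_some] at hd
    have hi : aLeft cs 0 0 = 0 := by
      simpa using aLeft_eq cs 0 (by omega)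
    have hj : aRight cs (-1) (cs.length + 1)
        = ((cs.drop 1).takeWhile PySem.Chars.isdigit).length := by
      rw [aRight, if_pos (by push_cast; omega)]
      have hget : PySem.List.pyGet? cs (-1 + 1) = some cs[0] := by
        have h01 : (-1 : Int) + 1 = ((0 : Nat) : Int) := by omega
        rw [h01, PySem.List.pyGet?_natCast]
        simp [List.getElem?_eq_getElem hlen]
      simp only [hget]
      rw [if_pos hd0]
      have h01 : (-1 : Int) + 1 = ((0 : Nat) : Int) := by omega
      rw [h01, aRight_eq cs cs.length 0 (by omega) (by omega)]
      simp
    rw [hi, hj]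
    have hright : PySem.List.slice cs (some 1) none = cs.drop 1 := by
      have h1n : (1 : Int) = ((1 : Nat) : Int) := by omega
      rw [h1n, PySem.List.slice_from_natCast]
    rw [hright, lstrip_count (cs.drop 1), PySem.List.slice_zero_start]
  · -- x ≥ 0
    have hx0 : 0 ≤ x := by omega
    set n : Nat := x.toNat with hn
    have hxn : x = (n : Int) := by omega
    have hnlen : n ≤ cs.length := by omega
    have hx' : ¬((n : Int) = -1) := by omega
    rw [hxn] at h3 ⊢
    simp only [if_neg hx', Int.toNat_natCast] at h3 ⊢
    have hi := aLeft_eq cs n (by omega)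
    have hj := aRight_eq cs ((cs.length : Int) - (n : Int)).toNat n hnlen (by omega)
    rw [hi, hj]
    have hleft : PySem.List.slice cs none (some (n : Int)) = cs.take n :=
      PySem.List.slice_to_natCast (xs := cs) (b := n)
    have hright : PySem.List.slice cs (some ((n : Int) + 1)) none = cs.drop (n + 1) := by
      have h1n : (n : Int) + 1 = ((n + 1 : Nat) : Int) := by omega
      rw [h1n, PySem.List.slice_from_natCast]
    rw [hleft, hright, rstrip_count (cs.take n), lstrip_count (cs.drop (n + 1))]
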